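-- pv_equiv track=rewrite | github.com/HCABurns/Advent-Of-Code | 2025/Day 1.py | part1
-- ===== SOURCE A (Python) =====
-- def part1(inputs):
--     prev = -1
--     dial = 50
--     code = 0
--     for rot in inputs:
--         d , val = rot[0], int(rot[1:])
--         direction = 1 if d == "R" else -1
--         amount = direction * val
--         dial += amount
--         dial %= 100
--         if dial == 0:
--             code += 1
--     return code
-- ===== SOURCE B (Python) =====
-- def part1(inputs):
--     amts = [(1 if r[0] == "R" else -1) * int(r[1:]) for r in inputs]
--
--     def go(l, offset):
--         # (number of prefixes of l whose landing position offset+prefix-sum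
--         #  is a multiple of 100, total sum of l)
--         if not l:
--             return (0, 0)
--         if len(l) == 1:
--             return ((1 if (offset + l[0]) % 100 == 0 else 0), l[0])
--         m = len(l) // 2
--         c1, s1 = go(l[:m], offset)
--         c2, s2 = go(l[m:], offset + s1)
--         return (c1 + c2, s1 + s2)
--
--     return go(amts, 50)[0]
-- ===== Notes on version B (the rewrite author's own statement) =====
-- stated objective: alternative
-- what changed: B maps rotations to signed amounts and then counts zero landings by divide-and-conquer: recursively split the amount list in half, each call returning (zero-landing count, slice sum), combining the right half at offset shifted by the left sum, instead of A's single left-to-right loop that reduces the dial mod 100 at each step.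
import Mathlib
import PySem

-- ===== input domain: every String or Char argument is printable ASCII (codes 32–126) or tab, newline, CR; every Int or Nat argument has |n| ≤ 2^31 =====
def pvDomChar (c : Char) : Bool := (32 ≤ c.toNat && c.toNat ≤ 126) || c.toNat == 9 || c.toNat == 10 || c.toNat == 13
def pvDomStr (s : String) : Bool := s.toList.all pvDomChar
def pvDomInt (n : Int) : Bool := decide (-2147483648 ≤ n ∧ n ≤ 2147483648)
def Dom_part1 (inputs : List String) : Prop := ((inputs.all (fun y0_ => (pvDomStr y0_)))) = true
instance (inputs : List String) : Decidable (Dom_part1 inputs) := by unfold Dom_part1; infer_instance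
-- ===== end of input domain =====

-- B counts zero landings by divide-and-conquer over the signed amounts (each call returns
-- (count, slice sum)), instead of A's left-to-right loop with a per-step mod-100 reduction.

-- ===== PORT A =====
-- one iteration of A's loop over state (dial, code); rot[0] / int(rot[1:]) are total here,
-- Pre_part1 excludes exactly the inputs where the Python raises
def part1Step (st : Int × Int) (rot : String) : Int × Int :=
  let cs := rot.toList
  let d := cs.headD ' '
  let val := (PySem.Int.ofChars? (cs.drop 1)).getD 0
  let direction : Int := if d = 'R' then 1 else -1
  let amount := direction * val
  let dial := PySem.Int.mod (st.1 + amount) 100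
  (dial, if dial = 0 then st.2 + 1 else st.2)

def part1 (inputs : List String) : Int :=
  (inputs.foldl part1Step (50, 0)).2

-- ===== PORT B =====
-- (1 if r[0] == "R" else -1) * int(r[1:])
def amountOf (r : String) : Int :=
  (if r.toList.headD ' ' = 'R' then 1 else -1) * (PySem.Int.ofChars? (r.toList.drop 1)).getD 0

-- Source B's recursive helper go(l, offset): split in half, recurse, combine
def goB : List Int → Int → Int × Int
  | [], _ => (0, 0)
  | [a], offset => ((if PySem.Int.mod (offset + a) 100 = 0 then (1 : Int) else 0), a)
  | a :: b :: l, offset =>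
      let m := (a :: b :: l).length / 2
      let p1 := goB ((a :: b :: l).take m) offset
      let p2 := goB ((a :: b :: l).drop m) (offset + p1.2)
      (p1.1 + p2.1, p1.2 + p2.2)
termination_by l _ => l.length
decreasing_by
  · simp; omega
  · simp; omega

def part1_alt (inputs : List String) : Int :=
  (goB (inputs.map amountOf) 50).1

-- ===== PRECONDITION & SPEC =====
-- Pre_ excludes exactly the inputs where Python A raises: an empty rotation string (IndexError
-- on rot[0]) or a tail that int() rejects (ValueError); B raises on the same inputs.
def Pre_part1 (inputs : List String) : Prop :=
  (inputs.all (fun s => !s.toList.isEmpty && (PySem.Int.ofChars? (s.toList.drop 1)).isSome)) = true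
instance (inputs : List String) : Decidable (Pre_part1 inputs) := by unfold Pre_part1; infer_instance

def pvWitness_part1 : List String := ["R5", "L55", "R100"]

def Spec_part1 (inputs : List String) (out : Int) : Prop := out = part1_alt inputs
instance (inputs : List String) (out : Int) : Decidable (Spec_part1 inputs out) := by unfold Spec_part1; infer_instance

-- ===== CLAIM (what is proved, stated in full; the proofs are below) =====
def Claim_equal_part1 : Prop := ∀ (inputs : List String), Dom_part1 inputs → Pre_part1 inputs → Spec_part1 inputs (part1 inputs)

-- ===== LEMMAS AND PROOFS =====

-- reference list of the un-reduced landing positions, seeded at offset o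
def psumsI (o : Int) : List Int → List Int
  | [] => []
  | a :: l => (o + a) :: psumsI (o + a) l

lemma psumsI_append (l1 l2 : List Int) (o : Int) :
    psumsI o (l1 ++ l2) = psumsI o l1 ++ psumsI (o + l1.sum) l2 := by
  induction l1 generalizing o with
  | nil => simp [psumsI]
  | cons a l ih => simp [psumsI, ih, add_assoc]

lemma goB_spec (l : List Int) (o : Int) :
    goB l o = ((((psumsI o l).countP (fun p => PySem.Int.mod p 100 = 0) : Nat) : Int), l.sum) := by
  fun_induction goB l o with
  | case1 => simp [psumsI]
  | case2 a o =>
    simp only [psumsI, List.countP_cons, List.countP_nil]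
    by_cases h : PySem.Int.mod (o + a) 100 = 0 <;> simp_all
  | case3 a b l o m p1 p2 ih1 ih2 ih3 =>
    have e2 : p2 = ((((psumsI (o + p1.2) ((a :: b :: l).drop m)).countP
        (fun p => PySem.Int.mod p 100 = 0) : Nat) : Int), ((a :: b :: l).drop m).sum) := ih3
    have e1 : p1 = ((((psumsI o ((a :: b :: l).take m)).countP
        (fun p => PySem.Int.mod p 100 = 0) : Nat) : Int), ((a :: b :: l).take m).sum) := ih1
    rw [e2, e1]
    conv_rhs => rw [show a :: b :: l = (a :: b :: l).take m ++ (a :: b :: l).drop m from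
      (List.take_append_drop m _).symm]
    rw [psumsI_append, List.countP_append, List.sum_append]
    push_cast
    rfl

lemma mod_add_mod (x a : Int) :
    PySem.Int.mod (PySem.Int.mod x 100 + a) 100 = PySem.Int.mod (x + a) 100 := by
  simp only [show ∀ y : Int, PySem.Int.mod y 100 = y % 100 from
        fun _ => PySem.Int.mod_eq_emod_of_pos (by norm_num)]
  exact Int.emod_add_emod x 100 a

lemma loopA_eq_count (l : List String) (o code : Int) :
    (l.foldl part1Step (PySem.Int.mod o 100, code)).2
      = code + (((psumsI o (l.map amountOf)).countP (fun p => PySem.Int.mod p 100 = 0) : Nat) : Int) := by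
  induction l generalizing o code with
  | nil => simp [psumsI]
  | cons r l ih =>
    have hstep : part1Step (PySem.Int.mod o 100, code) r
        = (PySem.Int.mod (o + amountOf r) 100,
           if PySem.Int.mod (o + amountOf r) 100 = 0 then code + 1 else code) := by
      simp only [part1Step, amountOf]
      rw [mod_add_mod]
      rfl
    rw [List.foldl_cons, hstep, ih]
    simp only [List.map_cons, psumsI, List.countP_cons]
    by_cases h : PySem.Int.mod (o + amountOf r) 100 = 0 <;>
      simp only [h, if_true, if_false, decide_true, decide_false] <;> push_cast <;> ring

-- ===== VERDICT (by name: the statement is the Claim_ definition above) =====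
theorem part1_spec : Claim_equal_part1 := by
  intro inputs _ _
  show part1 inputs = part1_alt inputs
  have h50 : (50 : Int) = PySem.Int.mod 50 100 := by decide
  simp only [part1, part1_alt, goB_spec]
  rw [h50, loopA_eq_count]
  simp
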